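-- pv_equiv track=rewrite | github.com/unknown4250/baekjoon | 프로그래머스/lv2/17686. ［3차］ 파일명 정렬/［3차］ 파일명 정렬.py | solution
-- ===== SOURCE A (Python) =====
-- def solution(files):
--     answer = []
--
--     # 파일명을 HEAD, NUMBER, TAIL로 파싱
--     for file in files:
--         head, number, tail = "", "", ""
--
--         for i in range(len(file)):
--             # 파일명 중 첫 번째 숫자인 경우
--             if file[i].isdigit():
--                 # HEAD, NUMBER 구분
--                 head = file[:i]
--
--                 tail_idx = i
--
--                 # NUMBER, TAIL 구분
--                 while tail_idx < len(file):
--                     if file[tail_idx].isdigit():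
--                         tail_idx += 1
--                     else:
--                         break
--
--                 number = file[i:tail_idx]
--                 tail = file[tail_idx:]
--
--                 answer.append([head, number, tail])
--                 break
--
--     # HEAD, NUMBER 기준으로 정렬
--     answer = sorted(answer, key=lambda x:(x[0].lower(), int(x[1])))
--
--     return ["".join(i) for i in answer]
-- ===== SOURCE B (Python) =====
-- def solution(files):
--     # Single pass: keep `res` sorted at all times, inserting each file at the
--     # position found by a hand-rolled binary search on the (lowercased head,
--     # number value) key; files without a digit are skipped, as in the original.
--     res = []  # entries (low_head, num, original_name), sorted by (low_head, num)
--     for f in files: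
--         i = 0
--         while i < len(f) and not f[i].isdigit():
--             i += 1
--         if i == len(f):
--             continue  # no digit: dropped
--         j = i
--         while j < len(f) and f[j].isdigit():
--             j += 1
--         h, n = f[:i].lower(), int(f[i:j])
--         lo, hi = 0, len(res)
--         while lo < hi:
--             mid = (lo + hi) // 2
--             if (h, n) < (res[mid][0], res[mid][1]):
--                 hi = mid
--             else:
--                 lo = mid + 1
--         res.insert(lo, (h, n, f))
--     return [t[2] for t in res]
-- ===== Notes on version B (the rewrite author's own statement) =====
-- stated objective: alternative
-- what changed: B replaces A's parse-all/batch-library-sort/re-join pipeline by a single pass that keeps an always-sorted accumulator: each file's (lowercased head, number value) key is found by two index-advancing while loops and the entry is placed with a hand-rolled binary search (bisect-right style) insertion; the original filename is stored alongside the key, so no join is needed.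
import Mathlib
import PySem

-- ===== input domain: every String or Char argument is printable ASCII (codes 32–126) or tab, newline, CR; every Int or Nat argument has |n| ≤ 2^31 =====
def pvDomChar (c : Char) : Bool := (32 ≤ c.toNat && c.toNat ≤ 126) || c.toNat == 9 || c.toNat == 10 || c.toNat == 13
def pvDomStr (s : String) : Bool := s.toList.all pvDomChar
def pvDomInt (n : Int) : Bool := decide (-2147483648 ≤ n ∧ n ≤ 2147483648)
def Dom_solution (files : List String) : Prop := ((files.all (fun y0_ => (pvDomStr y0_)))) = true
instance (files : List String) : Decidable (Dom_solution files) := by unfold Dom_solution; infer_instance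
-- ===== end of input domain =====

-- B replaces A's parse / batch sort / re-join pipeline by a single pass keeping an always-sorted
-- accumulator via hand-rolled binary-search insertion; objective: alternative.

-- ===== PORT A =====
-- inner `while tail_idx < len(file): if file[tail_idx].isdigit(): tail_idx += 1 else: break`
def aWhile (file : List Char) (t : Nat) : Nat :=
  if h : t < file.length then
    if PySem.Chars.isdigit file[t] then aWhile file (t + 1) else t
  else t
termination_by file.length - t

-- `for i in range(len(file)): if file[i].isdigit(): … break` — the triple appended, or none
-- (slices file[:i], file[i:tail_idx], file[tail_idx:] have 0 ≤ i ≤ tail_idx ≤ len, so take/drop is exact)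
def aFind (file : List Char) (i : Nat) : Option (List Char × List Char × List Char) :=
  if h : i < file.length then
    if PySem.Chars.isdigit file[i] then
      let tailIdx := aWhile file i
      some (file.take i, (file.take tailIdx).drop i, file.drop tailIdx)
    else aFind file (i + 1)
  else none
termination_by file.length - i

def solution (files : List String) : List String :=
  let answer : List (List Char × List Char × List Char) :=
    files.foldl (fun acc file =>
      match aFind file.toList 0 with
      | some t => acc ++ [t]
      | none => acc) []
  let answer2 := PySem.List.sorted2 answer
    (fun x => String.ofList (PySem.Chars.lower x.1))
    (fun x => (PySem.Int.ofChars? x.2.1).getD 0)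
  answer2.map (fun x => String.ofList (x.1 ++ (x.2.1 ++ x.2.2)))

-- ===== PORT B =====
-- `while i < len(f) and not f[i].isdigit(): i += 1`
def bScan (f : List Char) (i : Nat) : Nat :=
  if h : i < f.length then
    if !PySem.Chars.isdigit f[i] then bScan f (i + 1) else i
  else i
termination_by f.length - i

-- `while j < len(f) and f[j].isdigit(): j += 1`
def bRun (f : List Char) (j : Nat) : Nat :=
  if h : j < f.length then
    if PySem.Chars.isdigit f[j] then bRun f (j + 1) else j
  else j
termination_by f.length - j

-- `while lo < hi: mid = (lo+hi)//2; if (h,n) < key(res[mid]): hi = mid else: lo = mid+1`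
-- (res[mid] has 0 ≤ lo ≤ mid < hi ≤ len(res) at every call, so the getD default is never read)
def bSearch (h : String) (n : Int) (res : List (String × Int × String)) (lo hi : Nat) : Nat :=
  if hlt : lo < hi then
    let mid := (lo + hi) / 2
    let y := res[mid]?.getD ("", 0, "")
    if h < y.1 ∨ (h = y.1 ∧ n < y.2.1) then bSearch h n res lo mid
    else bSearch h n res (mid + 1) hi
  else lo
termination_by hi - lo
decreasing_by all_goals omega

-- the loop body: parse one file, binary-search its slot, insert (digit-less files are skipped)
def bStep (res : List (String × Int × String)) (f : String) : List (String × Int × String) :=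
  let cs := f.toList
  let i := bScan cs 0
  if i = cs.length then res           -- no digit: dropped
  else
    let j := bRun cs i
    let h := String.ofList (PySem.Chars.lower (cs.take i))      -- f[:i].lower()
    let n := (PySem.Int.ofChars? ((cs.take j).drop i)).getD 0   -- int(f[i:j]), a nonempty digit run
    let lo := bSearch h n res 0 res.length
    PySem.List.insert res (lo : Int) (h, n, f)

def solution_alt (files : List String) : List String :=
  let res : List (String × Int × String) := files.foldl bStep []
  res.map (fun t => t.2.2)

-- ===== PRECONDITION & SPEC =====
def Spec_solution (files : List String) (out : List String) : Prop := out = solution_alt files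
instance (files : List String) (out : List String) : Decidable (Spec_solution files out) := by unfold Spec_solution; infer_instance

-- ===== CLAIM (what is proved, stated in full; the proofs are below) =====
def Claim_equal_solution : Prop := ∀ (files : List String), Dom_solution files → Spec_solution files (solution files)

-- ===== LEMMAS AND PROOFS =====

-- A's parse triple, in takeWhile/dropWhile form (proof-side only)
def gParse (f : String) : List Char × List Char × List Char :=
  (f.toList.takeWhile (fun c => !PySem.Chars.isdigit c),
   (f.toList.dropWhile (fun c => !PySem.Chars.isdigit c)).takeWhile PySem.Chars.isdigit,
   (f.toList.dropWhile (fun c => !PySem.Chars.isdigit c)).dropWhile PySem.Chars.isdigit)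

-- A-triple to B-entry: (lowered head, numeric value, re-joined name)
def gMap (x : List Char × List Char × List Char) : String × Int × String :=
  (String.ofList (PySem.Chars.lower x.1), (PySem.Int.ofChars? x.2.1).getD 0,
   String.ofList (x.1 ++ (x.2.1 ++ x.2.2)))

-- the strict (head, number) order B's binary search uses
abbrev triLt (x y : String × Int × String) : Prop := x.1 < y.1 ∨ (x.1 = y.1 ∧ x.2.1 < y.2.1)

theorem take_length_takeWhile {α : Type} (p : α → Bool) (l : List α) :
    l.take (l.takeWhile p).length = l.takeWhile p := by
  induction l with
  | nil => rfl
  | cons a t ih =>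
    by_cases h : p a <;> simp [h, ih]

theorem drop_length_takeWhile {α : Type} (p : α → Bool) (l : List α) :
    l.drop (l.takeWhile p).length = l.dropWhile p := by
  induction l with
  | nil => rfl
  | cons a t ih =>
    by_cases h : p a <;> simp [h, ih]

theorem aWhile_spec (cs : List Char) (t : Nat) :
    aWhile cs t = t + ((cs.drop t).takeWhile PySem.Chars.isdigit).length := by
  induction t using aWhile.induct (file := cs) with
  | case1 t h hd ih =>
    rw [aWhile, dif_pos h, if_pos hd, ih,
      List.drop_eq_getElem_cons h, List.takeWhile_cons, hd]
    simp; omega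
  | case2 t h hd =>
    rw [aWhile, dif_pos h, if_neg hd,
      List.drop_eq_getElem_cons h, List.takeWhile_cons]
    simp [hd]
  | case3 t h =>
    rw [aWhile, dif_neg h, List.drop_eq_nil_of_le (by omega)]
    simp

theorem aFind_spec (cs : List Char) (i : Nat) :
    aFind cs i =
      if (cs.drop i).any PySem.Chars.isdigit then
        some (cs.take i ++ (cs.drop i).takeWhile (fun c => !PySem.Chars.isdigit c),
              ((cs.drop i).dropWhile (fun c => !PySem.Chars.isdigit c)).takeWhile PySem.Chars.isdigit,
              ((cs.drop i).dropWhile (fun c => !PySem.Chars.isdigit c)).dropWhile PySem.Chars.isdigit)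
      else none := by
  induction i using aFind.induct (file := cs) with
  | case1 i h hd =>
    rw [aFind, dif_pos h, if_pos hd]
    have hany : (cs.drop i).any PySem.Chars.isdigit = true := by
      rw [List.drop_eq_getElem_cons h, List.any_cons, hd]; simp
    have htw : (cs.drop i).takeWhile (fun c => !PySem.Chars.isdigit c) = [] := by
      rw [List.drop_eq_getElem_cons h, List.takeWhile_cons]; simp [hd]
    have hdw : (cs.drop i).dropWhile (fun c => !PySem.Chars.isdigit c) = cs.drop i := by
      rw [List.drop_eq_getElem_cons h, List.dropWhile_cons]
      simp only [hd, Bool.not_true, Bool.false_eq_true, ite_false]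
    rw [if_pos hany, htw, hdw, List.append_nil]
    have hw := aWhile_spec cs i
    simp only [Option.some.injEq, Prod.mk.injEq]
    refine ⟨trivial, ?_, ?_⟩
    · rw [hw, ← List.take_drop, take_length_takeWhile]
    · rw [hw, ← List.drop_drop, drop_length_takeWhile]
  | case2 i h hd ih =>
    rw [aFind, dif_pos h, if_neg hd, ih]
    have hc := List.drop_eq_getElem_cons h
    rw [hc, List.any_cons]
    have hd' : PySem.Chars.isdigit cs[i] = false := by
      cases hq : PySem.Chars.isdigit cs[i] with
      | true => exact absurd hq hd
      | false => rfl
    rw [hd']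
    simp only [Bool.false_or]
    by_cases ha : (cs.drop (i + 1)).any PySem.Chars.isdigit
    · rw [if_pos ha, if_pos ha, List.takeWhile_cons, List.dropWhile_cons]
      simp only [hd', Bool.not_false, if_true]
      have : cs.take (i + 1) = cs.take i ++ [cs[i]] := List.take_succ_eq_append_getElem h
      rw [this, List.append_assoc, List.singleton_append]
    · rw [if_neg ha, if_neg ha]
  | case3 i h =>
    rw [aFind, dif_neg h, List.drop_eq_nil_of_le (by omega)]
    simp

theorem aFind_zero (f : String) :
    aFind f.toList 0 =
      if f.toList.any PySem.Chars.isdigit then some (gParse f) else none := by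
  rw [aFind_spec, gParse]
  simp

theorem join_gParse (f : String) :
    (gParse f).1 ++ ((gParse f).2.1 ++ (gParse f).2.2) = f.toList := by
  simp only [gParse]
  rw [List.takeWhile_append_dropWhile, List.takeWhile_append_dropWhile]

-- map commutes with insertBy when the comparison factors through the map
theorem map_insertBy {α β : Type} (g : α → β) (before : α → α → Bool) (before' : β → β → Bool)
    (hb : ∀ a b, before' (g a) (g b) = before a b) (x : α) (ys : List α) :
    (PySem.List.insertBy before x ys).map g = PySem.List.insertBy before' (g x) (ys.map g) := by
  induction ys with
  | nil => rfl
  | cons y t ih =>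
    rw [PySem.List.insertBy, List.map_cons, PySem.List.insertBy, hb]
    by_cases h : before x y
    · rw [if_pos h, if_pos h]; rfl
    · rw [if_neg h, if_neg h, List.map_cons, ih]

theorem map_foldl_insertBy {α β : Type} (g : α → β) (before : α → α → Bool) (before' : β → β → Bool)
    (hb : ∀ a b, before' (g a) (g b) = before a b) (xs : List α) (acc : List α) :
    (xs.foldl (fun acc x => PySem.List.insertBy before x acc) acc).map g =
      (xs.map g).foldl (fun acc x => PySem.List.insertBy before' x acc) (acc.map g) := by
  induction xs generalizing acc with
  | nil => rfl
  | cons x t ih =>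
    rw [List.foldl_cons, List.map_cons, List.foldl_cons, ih, map_insertBy g before before' hb]

-- strict-order facts about triLt
theorem triLt_asymm {x y : String × Int × String} (h : triLt x y) : ¬ triLt y x := by
  rcases h with h1 | ⟨he, h2⟩
  · rintro (h1' | ⟨he', _⟩)
    · exact absurd h1' (not_lt.mpr (le_of_lt h1))
    · exact absurd he'.symm (ne_of_lt h1)
  · rintro (h1' | ⟨_, h2'⟩)
    · exact absurd h1' (not_lt.mpr (le_of_eq he))
    · exact absurd h2' (not_lt.mpr (le_of_lt h2))

theorem triLt_of_triLt_of_not_triLt {x y z : String × Int × String}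
    (h : triLt x y) (h' : ¬ triLt z y) : triLt x z := by
  have hz1 : y.1 ≤ z.1 := not_lt.mp (fun hc => h' (Or.inl hc))
  rcases h with h1 | ⟨he, h2⟩
  · exact Or.inl (lt_of_lt_of_le h1 hz1)
  · rcases lt_or_eq_of_le hz1 with hlt | heq
    · exact Or.inl (he ▸ hlt)
    · have hz2 : y.2.1 ≤ z.2.1 := not_lt.mp (fun hc => h' (Or.inr ⟨heq.symm, hc⟩))
      exact Or.inr ⟨he.trans heq, lt_of_lt_of_le h2 hz2⟩

-- B's boolean comparison coincides with sorted2's comparator through gMap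
theorem triLt_decide_eq (a b : List Char × List Char × List Char) :
    decide (triLt (gMap a) (gMap b)) =
      (decide ((fun x => String.ofList (PySem.Chars.lower x.1)) a < (fun x => String.ofList (PySem.Chars.lower x.1)) b) ||
       !decide ((fun x => String.ofList (PySem.Chars.lower x.1)) b < (fun x => String.ofList (PySem.Chars.lower x.1)) a) &&
       decide ((fun x => (PySem.Int.ofChars? x.2.1).getD 0) a < (fun x => (PySem.Int.ofChars? x.2.1).getD 0) b)) := by
  simp only [triLt, gMap]
  rcases lt_trichotomy (String.ofList (PySem.Chars.lower a.1)) (String.ofList (PySem.Chars.lower b.1)) with h | h | h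
  · simp [h, not_lt.mpr (le_of_lt h)]
  · simp [h]
  · simp [h, not_lt.mpr (le_of_lt h), ne_of_gt h]

-- binary search returns a "bisect_right" position: everything strictly past it is above the key
theorem bSearch_spec (h : String) (n : Int) (res : List (String × Int × String)) (lo hi : Nat)
    (hs : res.Pairwise (fun a b => ¬ triLt b a))
    (hhi : hi ≤ res.length) (hlo : lo ≤ hi)
    (hbelow : ∀ p (hp : p < res.length), p < lo → ¬ triLt (h, n, "") res[p])
    (habove : ∀ p (hp : p < res.length), hi ≤ p → triLt (h, n, "") res[p]) :
    bSearch h n res lo hi ≤ res.length ∧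
    (∀ p (hp : p < res.length), p < bSearch h n res lo hi → ¬ triLt (h, n, "") res[p]) ∧
    (∀ p (hp : p < res.length), bSearch h n res lo hi ≤ p → triLt (h, n, "") res[p]) := by
  revert hhi hlo hbelow habove
  induction lo, hi using bSearch.induct (h := h) (n := n) (res := res) with
  | case1 lo hi hlt mid y hcond ih =>
    intro hhi hlo hbelow habove
    have hmid : mid < res.length := by omega
    have hy : y = res[mid] := by
      simp only [y, List.getElem?_eq_getElem hmid, Option.getD_some]
    have hLt : triLt (h, n, "") res[mid] := by rw [← hy]; exact hcond
    rw [bSearch, dif_pos hlt]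
    simp only [← hy] at hLt ⊢
    rw [if_pos hcond]
    apply ih (by omega) (by omega) hbelow
    intro p hp hmp
    rcases eq_or_lt_of_le hmp with heq | hlt'
    · rw [hy] at hLt; simpa [← heq] using hLt
    · have hpm : ¬ triLt res[p] res[mid] :=
        (List.pairwise_iff_getElem.mp hs) mid p hmid hp hlt'
      rw [hy] at hLt
      exact triLt_of_triLt_of_not_triLt hLt hpm
  | case2 lo hi hlt mid y hcond ih =>
    intro hhi hlo hbelow habove
    have hmid : mid < res.length := by omega
    have hy : y = res[mid] := by
      simp only [y, List.getElem?_eq_getElem hmid, Option.getD_some]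
    have hnLt : ¬ triLt (h, n, "") res[mid] := by rw [← hy]; exact hcond
    rw [bSearch, dif_pos hlt]
    simp only [← hy] at hnLt ⊢
    rw [if_neg hcond]
    apply ih hhi (by omega) _ habove
    intro p hp hpm
    rcases Nat.lt_succ_iff_lt_or_eq.mp hpm with hlt' | heq
    · rcases Nat.lt_or_ge p lo with hplo | hplo
      · exact hbelow p hp hplo
      · intro hc
        have hpm' : ¬ triLt res[mid] res[p] :=
          (List.pairwise_iff_getElem.mp hs) p mid hp hmid hlt'
        rw [hy] at hnLt
        exact hnLt (triLt_of_triLt_of_not_triLt hc hpm')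
    · rw [hy] at hnLt; simpa [heq] using hnLt
  | case3 lo hi hlt =>
    intro hhi hlo hbelow habove
    have hle : lo = hi := by omega
    rw [bSearch, dif_neg hlt]
    exact ⟨by omega, fun p hp hplo => hbelow p hp hplo, fun p hp hplo => habove p hp (hle ▸ hplo)⟩

-- inserting at such a position is exactly insertBy
theorem insert_pos_eq_insertBy (x : String × Int × String) (res : List (String × Int × String))
    (r : Nat) (hr : r ≤ res.length)
    (hb : ∀ p (hp : p < res.length), p < r → ¬ triLt x res[p])
    (ha : ∀ p (hp : p < res.length), r ≤ p → triLt x res[p]) :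
    res.take r ++ x :: res.drop r =
      PySem.List.insertBy (fun a b => decide (triLt a b)) x res := by
  induction res generalizing r with
  | nil =>
    have : r = 0 := by simpa using hr
    subst this; rfl
  | cons y t ih =>
    cases r with
    | zero =>
      have h0 : triLt x y := by simpa using ha 0 (by simp) (Nat.zero_le 0)
      rw [PySem.List.insertBy, if_pos (decide_eq_true h0)]
      rfl
    | succ r' =>
      have h0 : ¬ triLt x y := by simpa using hb 0 (by simp) (Nat.succ_pos r')
      rw [PySem.List.insertBy, if_neg (by simpa using h0)]
      simp only [List.take_succ_cons, List.drop_succ_cons, List.cons_append, List.cons.injEq,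
        true_and]
      exact ih r' (by simpa using hr)
        (fun p hp hpr => by simpa using hb (p + 1) (by simpa using hp) (by omega))
        (fun p hp hpr => by simpa using ha (p + 1) (by simpa using hp) (by omega))

-- insertBy keeps the accumulator sorted
theorem pairwise_insertBy (x : String × Int × String) (res : List (String × Int × String))
    (hs : res.Pairwise (fun a b => ¬ triLt b a)) :
    (PySem.List.insertBy (fun a b => decide (triLt a b)) x res).Pairwise (fun a b => ¬ triLt b a) := by
  induction res with
  | nil => simp [PySem.List.insertBy]
  | cons y t ih =>
    rcases List.pairwise_cons.mp hs with ⟨hy, ht⟩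
    by_cases hxy : triLt x y
    · rw [PySem.List.insertBy, if_pos (decide_eq_true hxy)]
      refine List.pairwise_cons.mpr ⟨?_, List.pairwise_cons.mpr ⟨hy, ht⟩⟩
      intro z hz
      rcases List.mem_cons.mp hz with rfl | hzt
      · exact triLt_asymm hxy
      · exact triLt_asymm (triLt_of_triLt_of_not_triLt hxy (hy z hzt))
    · rw [PySem.List.insertBy, if_neg (by simpa using hxy)]
      refine List.pairwise_cons.mpr ⟨?_, ih ht⟩
      intro z hz
      rcases (PySem.List.mem_insertBy _ _ _ _).mp hz with rfl | hzt
      · exact hxy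
      · exact hy z hzt

-- B's per-file step, on a sorted accumulator, is insertBy of the parsed entry (or a skip)
theorem bScan_spec (cs : List Char) (i : Nat) :
    bScan cs i = i + ((cs.drop i).takeWhile (fun c => !PySem.Chars.isdigit c)).length := by
  induction i using bScan.induct (f := cs) with
  | case1 i h hd ih =>
    rw [bScan, dif_pos h, if_pos hd, ih,
      List.drop_eq_getElem_cons h, List.takeWhile_cons, hd]
    simp; omega
  | case2 i h hd =>
    rw [bScan, dif_pos h, if_neg hd,
      List.drop_eq_getElem_cons h, List.takeWhile_cons]
    simp only [Bool.not_eq_true] at hd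
    simp [hd]
  | case3 i h =>
    rw [bScan, dif_neg h, List.drop_eq_nil_of_le (by omega)]
    simp

theorem bRun_spec (cs : List Char) (j : Nat) :
    bRun cs j = j + ((cs.drop j).takeWhile PySem.Chars.isdigit).length := by
  induction j using bRun.induct (f := cs) with
  | case1 j h hd ih =>
    rw [bRun, dif_pos h, if_pos hd, ih,
      List.drop_eq_getElem_cons h, List.takeWhile_cons, hd]
    simp; omega
  | case2 j h hd =>
    rw [bRun, dif_pos h, if_neg hd,
      List.drop_eq_getElem_cons h, List.takeWhile_cons]
    simp [hd]
  | case3 j h =>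
    rw [bRun, dif_neg h, List.drop_eq_nil_of_le (by omega)]
    simp

-- the scan reaches the end exactly when the string has no digit
theorem scanAll_iff (cs : List Char) :
    ((cs.takeWhile (fun c => !PySem.Chars.isdigit c)).length = cs.length) ↔
      cs.any PySem.Chars.isdigit = false := by
  induction cs with
  | nil => simp
  | cons a t ih =>
    by_cases h : PySem.Chars.isdigit a
    · simp [h]
    · simp [h, ih]

theorem stepB_eq (f : String) (res : List (String × Int × String))
    (hs : res.Pairwise (fun a b => ¬ triLt b a)) :
    bStep res f =
    (if f.toList.any PySem.Chars.isdigit then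
       PySem.List.insertBy (fun a b => decide (triLt a b)) (gMap (gParse f)) res
     else res) := by
  simp only [bStep, bScan_spec, List.drop_zero, Nat.zero_add]
  by_cases hall : (f.toList.takeWhile (fun c => !PySem.Chars.isdigit c)).length = f.toList.length
  · rw [if_pos hall, (scanAll_iff f.toList).mp hall]
    simp
  · have hany : f.toList.any PySem.Chars.isdigit = true := by
      rcases Bool.eq_false_or_eq_true (f.toList.any PySem.Chars.isdigit) with hc | hc
      · exact hc
      · exact absurd ((scanAll_iff f.toList).mpr hc) hall
    rw [if_neg hall, hany, if_pos rfl]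
    -- the parsed entry is gMap (gParse f)
    have hhead : f.toList.take
        (f.toList.takeWhile (fun c => !PySem.Chars.isdigit c)).length =
        (gParse f).1 := by
      rw [take_length_takeWhile]; rfl
    have hnum : (f.toList.take (bRun f.toList
          (f.toList.takeWhile (fun c => !PySem.Chars.isdigit c)).length)).drop
          (f.toList.takeWhile (fun c => !PySem.Chars.isdigit c)).length =
        (gParse f).2.1 := by
      rw [bRun_spec, List.drop_take, Nat.add_sub_cancel_left, drop_length_takeWhile,
        take_length_takeWhile]
      rfl
    have hbs := bSearch_spec (String.ofList (PySem.Chars.lower ((gParse f).1)))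
      ((PySem.Int.ofChars? ((gParse f).2.1)).getD 0) res 0 res.length hs (le_refl _)
      (Nat.zero_le _) (fun p hp hp0 => absurd hp0 (by omega))
      (fun p hp hge => absurd hp (by omega))
    obtain ⟨hr, hb, ha⟩ := hbs
    rw [hhead, hnum, PySem.List.insert_natCast _ _ _ hr,
      insert_pos_eq_insertBy (String.ofList (PySem.Chars.lower ((gParse f).1)),
          (PySem.Int.ofChars? ((gParse f).2.1)).getD 0, f) res _ hr
        (fun p hp hpr => hb p hp hpr) (fun p hp hpr => ha p hp hpr)]
    have hent : ((String.ofList (PySem.Chars.lower ((gParse f).1)),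
        (PySem.Int.ofChars? ((gParse f).2.1)).getD 0, f) : String × Int × String) =
        gMap (gParse f) := by
      simp only [gMap, Prod.mk.injEq, true_and]
      rw [join_gParse, String.ofList_toList]
    rw [hent]

theorem foldB_eq (files : List String) (acc : List (String × Int × String))
    (hacc : acc.Pairwise (fun a b => ¬ triLt b a)) :
    files.foldl bStep acc =
    ((files.filter (fun f => f.toList.any PySem.Chars.isdigit)).map (fun f => gMap (gParse f))).foldl
      (fun res x => PySem.List.insertBy (fun a b => decide (triLt a b)) x res) acc := by
  induction files generalizing acc with
  | nil => rfl
  | cons f t ih =>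
    rw [List.foldl_cons, List.filter_cons, stepB_eq f acc hacc]
    by_cases hany : f.toList.any PySem.Chars.isdigit
    · rw [if_pos hany, if_pos hany, List.map_cons, List.foldl_cons]
      exact ih _ (pairwise_insertBy _ _ hacc)
    · rw [if_neg hany, if_neg (by simpa using hany)]
      exact ih _ hacc

-- ===== VERDICT (by name: the statement is the Claim_ definition above) =====
theorem solution_spec : Claim_equal_solution := by
  intro files _
  show solution files = solution_alt files
  simp only [solution, solution_alt]
  have hfold : files.foldl (fun acc file =>
      match aFind file.toList 0 with
      | some t => acc ++ [t]
      | none => acc) [] =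
      (files.filter (fun f => f.toList.any PySem.Chars.isdigit)).map gParse := by
    have : (fun (acc : List (List Char × List Char × List Char)) (file : String) =>
        match aFind file.toList 0 with
        | some t => acc ++ [t]
        | none => acc) =
        (fun acc file => if f_ : file.toList.any PySem.Chars.isdigit then acc ++ [gParse file] else acc) := by
      funext acc file
      rw [aFind_zero]
      by_cases h : file.toList.any PySem.Chars.isdigit
      · rw [if_pos h]; simp [h]
      · rw [if_neg h]; simp [h]
    rw [this]
    simpa using PySem.List.foldl_append_if (fun f => f.toList.any PySem.Chars.isdigit) gParse files []
  rw [hfold]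
  rw [foldB_eq files [] List.Pairwise.nil]
  have hsorted2 : PySem.List.sorted2 ((files.filter (fun f => f.toList.any PySem.Chars.isdigit)).map gParse)
      (fun x => String.ofList (PySem.Chars.lower x.1))
      (fun x => (PySem.Int.ofChars? x.2.1).getD 0) =
      ((files.filter (fun f => f.toList.any PySem.Chars.isdigit)).map gParse).foldl
        (fun acc x => PySem.List.insertBy
          (fun a b => decide ((fun x => String.ofList (PySem.Chars.lower x.1)) a < (fun x => String.ofList (PySem.Chars.lower x.1)) b) ||
            !decide ((fun x => String.ofList (PySem.Chars.lower x.1)) b < (fun x => String.ofList (PySem.Chars.lower x.1)) a) &&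
            decide ((fun x => (PySem.Int.ofChars? x.2.1).getD 0) a < (fun x => (PySem.Int.ofChars? x.2.1).getD 0) b)) x acc) [] := by
    rw [PySem.List.sorted2]
    simp
  rw [hsorted2]
  have hmap := map_foldl_insertBy gMap _ (fun a b => decide (triLt a b))
    (fun a b => triLt_decide_eq a b)
    ((files.filter (fun f => f.toList.any PySem.Chars.isdigit)).map gParse) []
  rw [List.map_map] at hmap
  simp only [List.map_nil] at hmap
  have hcomp : (fun f => gMap (gParse f)) = (gMap ∘ gParse) := rfl
  rw [hcomp, ← hmap, List.map_map]
  apply List.map_congr_left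
  intro x _
  rfl
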